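-- pv_equiv track=rewrite | github.com/Drachier/PyTreeNet | pytreenet/contractions/local_contr.py | _new_leg_val
-- ===== SOURCE A (Python) =====
-- def _new_leg_val(leg_value: int | None,
--                    sorted_rem_legs: list[int]
--                    ) -> int | None:
--     """
--     Returns the amount new value of the given leg.
--
--     Args:
--         leg_value (int | None): The current value of the leg.
--         sorted_rem_legs (list[int]): A sorted list of the
--             legs that were contracted.
--     """
--     if len(sorted_rem_legs) == 0:
--         return leg_value
--     if leg_value is None:
--         # The leg is already gone and stays gone.
--         return None
--     if leg_value < sorted_rem_legs[0]:
--         # Smaller than all contracted legs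
--         # No need to adjust
--         return leg_value
--     for i, rem_val in enumerate(sorted_rem_legs[:-1]):
--         if leg_value == rem_val:
--             # This leg was contracted
--             return None
--         if leg_value > rem_val and leg_value < sorted_rem_legs[i+1]:
--             # This means i many legs that come before this one were
--             # contracted.
--             return leg_value - (i+1)
--     # Treat the final one special
--     if leg_value == sorted_rem_legs[-1]:
--         # This leg was contracted
--         return None
--     if leg_value > sorted_rem_legs[-1]:
--         # Larger than all contracted legs
--         return leg_value - len(sorted_rem_legs)
--     raise ValueError(f"Invalid leg value {leg_value}!")
-- ===== SOURCE B (Python) =====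
-- from bisect import bisect_left
--
-- def _new_leg_val(leg_value, sorted_rem_legs):
--     if leg_value is None or not sorted_rem_legs:
--         return leg_value
--     i = bisect_left(sorted_rem_legs, leg_value)
--     if i < len(sorted_rem_legs) and sorted_rem_legs[i] == leg_value:
--         return None
--     return leg_value - i
-- ===== Notes on version B (the rewrite author's own statement) =====
-- stated objective: faster
-- what changed: Replaced the linear scan with early returns by a single bisect_left binary search: membership decides the contracted (None) case and the insertion point is exactly the number of smaller contracted legs to subtract.
-- outside the precondition, e.g. on _new_leg_val(3, [5, 1]): A returns 3, B returns 1
import Mathlib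
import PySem

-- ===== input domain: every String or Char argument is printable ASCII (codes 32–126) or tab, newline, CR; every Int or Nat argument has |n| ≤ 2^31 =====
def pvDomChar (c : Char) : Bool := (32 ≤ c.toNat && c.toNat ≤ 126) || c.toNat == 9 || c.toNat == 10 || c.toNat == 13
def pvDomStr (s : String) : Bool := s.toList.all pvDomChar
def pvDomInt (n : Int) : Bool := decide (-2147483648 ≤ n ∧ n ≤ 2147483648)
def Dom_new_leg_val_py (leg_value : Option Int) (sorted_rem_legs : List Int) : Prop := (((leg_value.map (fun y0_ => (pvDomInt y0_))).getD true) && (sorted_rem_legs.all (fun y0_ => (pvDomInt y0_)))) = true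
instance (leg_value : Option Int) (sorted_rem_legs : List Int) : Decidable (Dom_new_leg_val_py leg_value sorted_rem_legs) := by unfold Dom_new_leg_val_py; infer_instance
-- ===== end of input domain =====

-- B replaces A's linear scan by one bisect_left binary search (asymptotically faster); equal on all sorted inputs.

-- ===== PORT A =====
-- the 'for i, rem_val in enumerate(sorted_rem_legs[:-1])' loop with its two early returns;
-- `some r` = early return with value r, `none` = loop fell through.
-- sorted_rem_legs[i+1] is always in range here (i ranges over the list minus its last element),
-- so the `.getD 0` default is never taken.
def newLegValLoop (v : Int) (legs : List Int) : List (Int × Int) → Option (Option Int)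
  | [] => none
  | (i, rem) :: rest =>
    if v = rem then some none
    else if rem < v ∧ v < (PySem.List.pyGet? legs (i + 1)).getD 0 then some (some (v - (i + 1)))
    else newLegValLoop v legs rest

def new_leg_val_py (leg_value : Option Int) (sorted_rem_legs : List Int) : Option Int :=
  if sorted_rem_legs.length = 0 then leg_value
  else
    match leg_value with
    | none => none
    | some v =>
      -- legs[0] exists here (length ≠ 0), so `.getD 0` is never taken
      if v < (PySem.List.pyGet? sorted_rem_legs 0).getD 0 then some v
      else
        match newLegValLoop v sorted_rem_legs
            (PySem.List.enumerate (PySem.List.slice sorted_rem_legs none (some (-1))) 0) with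
        | some r => r
        | none =>
          -- legs[-1] exists here, `.getD 0` never taken
          let lastv := (PySem.List.pyGet? sorted_rem_legs (-1)).getD 0
          if v = lastv then none
          else if v > lastv then some (v - sorted_rem_legs.length)
          else none  -- Python raises ValueError here; unreachable under Pre_ (sorted input)

-- ===== PORT B =====
def new_leg_val_py_alt (leg_value : Option Int) (sorted_rem_legs : List Int) : Option Int :=
  match leg_value with
  | none => none  -- returns leg_value (= None)
  | some v =>
    if sorted_rem_legs = [] then some v  -- returns leg_value
    else
      let i := PySem.List.bisectLeft sorted_rem_legs v
      if i < sorted_rem_legs.length ∧ sorted_rem_legs[i]? = some v then none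
      else some (v - i)

-- ===== PRECONDITION & SPEC =====
-- Pre_ restricts to the documented natural domain (the docstring requires "a sorted list"): on
-- unsorted lists A either raises ValueError or returns accidental values of its scan order that
-- B's binary search has no reason to reproduce. When leg_value is None the list is never
-- inspected beyond emptiness, so no sortedness is required there.
def Pre_new_leg_val_py (leg_value : Option Int) (sorted_rem_legs : List Int) : Prop :=
  sorted_rem_legs.Pairwise (· ≤ ·) ∨ leg_value = none
instance (leg_value : Option Int) (sorted_rem_legs : List Int) : Decidable (Pre_new_leg_val_py leg_value sorted_rem_legs) := by unfold Pre_new_leg_val_py; infer_instance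

def pvWitness_new_leg_val_py : Option Int × List Int := (some 4, [1, 2, 5])

def Spec_new_leg_val_py (leg_value : Option Int) (sorted_rem_legs : List Int) (out : Option Int) : Prop := out = new_leg_val_py_alt leg_value sorted_rem_legs
instance (leg_value : Option Int) (sorted_rem_legs : List Int) (out : Option Int) : Decidable (Spec_new_leg_val_py leg_value sorted_rem_legs out) := by unfold Spec_new_leg_val_py; infer_instance

-- ===== CLAIM (what is proved, stated in full; the proofs are below) =====
def Claim_equal_new_leg_val_py : Prop := ∀ (leg_value : Option Int) (sorted_rem_legs : List Int), Dom_new_leg_val_py leg_value sorted_rem_legs → Pre_new_leg_val_py leg_value sorted_rem_legs → Spec_new_leg_val_py leg_value sorted_rem_legs (new_leg_val_py leg_value sorted_rem_legs)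

-- ===== LEMMAS AND PROOFS =====

-- canonical value both programs compute on a sorted list
def canonV (v : Int) (legs : List Int) : Option Int :=
  if v ∈ legs then none else some (v - legs.countP (· < v))

-- countP equals i when the predicate holds exactly on the first i positions
lemma countP_eq_of_index (p : Int → Bool) :
    ∀ (legs : List Int) (i : Nat), i ≤ legs.length →
    (∀ j (h : j < legs.length), (p legs[j] = true ↔ j < i)) →
    legs.countP p = i := by
  intro legs
  induction legs with
  | nil =>
    intro i hi _
    simp only [List.length_nil, Nat.le_zero] at hi
    simp [hi]
  | cons a t ih =>
    intro i hi hidx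
    cases i with
    | zero =>
      rw [List.countP_eq_zero.mpr]
      intro x hx
      obtain ⟨j, hj, rfl⟩ := List.mem_iff_getElem.mp hx
      intro hp
      exact absurd ((hidx j hj).mp hp) (by omega)
    | succ k =>
      have ha : p a = true := (hidx 0 (by simp)).mpr (by omega)
      rw [List.countP_cons_of_pos ha]
      have := ih k (by simpa using hi) (fun j hj => by
        have := hidx (j + 1) (by simpa using Nat.succ_lt_succ hj)
        simpa [Nat.succ_lt_succ_iff] using this)
      omega

lemma sorted_index_le {legs : List Int} (hs : legs.Pairwise (· ≤ ·))
    {i j : Nat} (hi : i < legs.length) (hj : j < legs.length) (hij : i ≤ j) :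
    legs[i] ≤ legs[j] := by
  rcases Nat.lt_or_ge i j with h | h
  · exact List.pairwise_iff_getElem.mp hs i j hi hj h
  · have : i = j := by omega
    subst this; exact le_refl _

-- B computes canonV on every sorted list
lemma alt_eq_canon (v : Int) (legs : List Int) (hs : legs.Pairwise (· ≤ ·)) :
    new_leg_val_py_alt (some v) legs = canonV v legs := by
  by_cases hnil : legs = []
  · subst hnil; simp [new_leg_val_py_alt, canonV]
  · obtain ⟨hle, hlt, hge⟩ := PySem.List.bisectLeft_spec legs v hs
    set i := PySem.List.bisectLeft legs v with hi
    have hmem : (i < legs.length ∧ legs[i]? = some v) ↔ v ∈ legs := by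
      constructor
      · rintro ⟨h1, h2⟩
        exact List.mem_of_getElem? h2
      · intro hv
        obtain ⟨j, hj, hjv⟩ := List.mem_iff_getElem.mp hv
        have hij : i ≤ j := by
          by_contra hc
          push_neg at hc
          have := hlt j hj hc
          omega
        have hilen : i < legs.length := lt_of_le_of_lt hij hj
        have h1 : v ≤ legs[i] := hge i hilen (le_refl _)
        have h2 : legs[i] ≤ legs[j] := sorted_index_le hs hilen hj hij
        have hjval : legs[j] = v := hjv
        have hiv : legs[i] = v := by omega
        refine ⟨hilen, ?_⟩
        rw [List.getElem?_eq_getElem hilen, hiv]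
    by_cases hv : v ∈ legs
    · have hcond := hmem.mpr hv
      simp only [new_leg_val_py_alt, if_neg hnil, ← hi, canonV, if_pos hv]
      rw [if_pos hcond]
    · have hcnt : legs.countP (· < v) = i := by
        apply countP_eq_of_index _ _ _ hle
        intro j hj
        constructor
        · intro hp
          by_contra hc
          have := hge j hj (by omega)
          simp at hp; omega
        · intro hji
          simpa using hlt j hj hji
      have hnm : ¬(i < legs.length ∧ legs[i]? = some v) := fun h => hv (hmem.mp h)
      simp only [new_leg_val_py_alt, hnil, if_false, ← hi]
      rw [if_neg hnm]
      simp [canonV, hv, hcnt]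

-- the scan of A computes canonV, by induction over the remaining middle part:
-- legs = front ++ mid ++ [lastv], all of front is < v, and the next element (head of
-- mid ++ [lastv]) is ≤ v when the scan reaches it.
lemma loop_eq_canon (v lastv : Int) :
    ∀ (mid front : List Int),
    (front ++ mid ++ [lastv]).Pairwise (· ≤ ·) →
    (∀ x ∈ front, x < v) →
    (∀ m, (mid ++ [lastv]).head? = some m → m ≤ v) →
    (match newLegValLoop v (front ++ mid ++ [lastv])
        (PySem.List.enumerate mid (front.length : Int)) with
     | some r => r
     | none =>
        if v = lastv then none
        else if v > lastv then some (v - (front ++ mid ++ [lastv]).length)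
        else none)
      = canonV v (front ++ mid ++ [lastv]) := by
  intro mid
  induction mid with
  | nil =>
    intro front hs hfront hhead
    have hlast : lastv ≤ v := hhead lastv (by simp)
    have henum : PySem.List.enumerate ([] : List Int) (front.length : Int) = [] := rfl
    rw [henum]
    simp only [newLegValLoop]
    by_cases hv : v = lastv
    · have hmem : v ∈ front ++ ([] : List Int) ++ [lastv] := by simp [hv]
      simp only [canonV, if_pos hmem, if_pos hv]
    · have hgt : v > lastv := lt_of_le_of_ne hlast (fun h => hv h.symm)
      have hnm : v ∉ front ++ ([] : List Int) ++ [lastv] := by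
        simp only [List.append_nil, List.mem_append, List.mem_singleton]
        rintro (h | rfl)
        · exact absurd rfl (ne_of_gt (hfront v h))
        · exact hv rfl
      have hcnt : (front ++ ([] : List Int) ++ [lastv]).countP (· < v) =
          ((front ++ ([] : List Int) ++ [lastv]).length : Int) := by
        rw [List.countP_eq_length.mpr]
        intro x hx
        simp only [List.append_nil, List.mem_append, List.mem_singleton] at hx
        rcases hx with h | rfl
        · simpa using hfront x h
        · simpa using hgt
      simp only [canonV, if_neg hnm, if_neg hv, if_pos hgt, hcnt]
  | cons m rest ih =>
    intro front hs hfront hhead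
    have hmv : m ≤ v := hhead m (by simp)
    rw [PySem.List.enumerate_cons]
    obtain ⟨nx, tl, hnt⟩ : ∃ n t, rest ++ [lastv] = n :: t := by
      cases rest <;> exact ⟨_, _, rfl⟩
    have hlegs : front ++ (m :: rest) ++ [lastv] = front ++ m :: (rest ++ [lastv]) := by simp
    have hnext : (PySem.List.pyGet? (front ++ (m :: rest) ++ [lastv])
        ((front.length : Int) + 1)).getD 0 = nx := by
      have : front ++ (m :: rest) ++ [lastv] = (front ++ [m]) ++ (nx :: tl) := by
        rw [hlegs, hnt]; simp
      rw [this]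
      have := PySem.List.pyGet?_append_right (front ++ [m]) (nx :: tl) 0
      simp only [List.length_append, List.length_singleton] at this
      have hcast : ((front.length : Int) + 1) = ((front.length + 1 : Nat) : Int) + (0 : Nat) := by
        push_cast; ring
      rw [hcast, this]; simp
    simp only [newLegValLoop]
    by_cases hvm : v = m
    · have : v ∈ front ++ (m :: rest) ++ [lastv] := by simp [hvm]
      simp [hvm, canonV, this]
    · rw [if_neg hvm]
      have hmv' : m < v := lt_of_le_of_ne hmv (fun h => hvm h.symm)
      by_cases hbr : v < nx
      · rw [if_pos (by rw [hnext]; exact ⟨hmv', hbr⟩)]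
        -- bracket found: result is v - (front.length + 1)
        have hsorted' : (nx :: tl).Pairwise (· ≤ ·) := by
          have : (front ++ m :: (rest ++ [lastv])).Pairwise (· ≤ ·) := by rwa [← hlegs]
          have h1 := (List.pairwise_append.mp this).2.1
          have h2 := (List.pairwise_cons.mp h1).2
          rwa [hnt] at h2
        have htl : ∀ x ∈ nx :: tl, v < x := by
          intro x hx
          rcases List.mem_cons.mp hx with rfl | hx'
          · exact hbr
          · have := (List.pairwise_cons.mp hsorted').1 x hx'
            omega
        have hnm : v ∉ front ++ (m :: rest) ++ [lastv] := by
          rw [hlegs]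
          intro hv'
          rcases List.mem_append.mp hv' with h | h
          · exact absurd rfl (ne_of_gt (hfront v h))
          · rcases List.mem_cons.mp h with rfl | h'
            · exact hvm rfl
            · rw [hnt] at h'
              exact lt_irrefl v (htl v h')
        have hcnt : (front ++ (m :: rest) ++ [lastv]).countP (· < v) = front.length + 1 := by
          rw [hlegs, List.countP_append, List.countP_cons_of_pos (by simpa using hmv'), hnt]
          have c1 : front.countP (· < v) = front.length :=
            List.countP_eq_length.mpr (fun x hx => by simpa using hfront x hx)
          have c2 : (nx :: tl).countP (· < v) = 0 :=
            List.countP_eq_zero.mpr (fun x hx => by have := htl x hx; simp; omega)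
          omega
        simp only [canonV, if_neg hnm, hcnt]
        congr 1
      · rw [if_neg (by rw [hnext]; exact fun h => hbr h.2)]
        have hnxv : nx ≤ v := by omega
        have hfr' : ∀ x ∈ front ++ [m], x < v := by
          intro x hx
          rcases List.mem_append.mp hx with h | h
          · exact hfront x h
          · simp at h; omega
        have hs' : ((front ++ [m]) ++ rest ++ [lastv]).Pairwise (· ≤ ·) := by
          have : (front ++ [m]) ++ rest ++ [lastv] = front ++ (m :: rest) ++ [lastv] := by simp
          rwa [this]
        have hh' : ∀ m', (rest ++ [lastv]).head? = some m' → m' ≤ v := by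
          intro m' hm'
          rw [hnt] at hm'; simp at hm'; omega
        have := ih (front ++ [m]) hs' hfr' hh'
        have hlen : ((front ++ [m]).length : Int) = (front.length : Int) + 1 := by
          simp
        rw [hlen] at this
        have heq : (front ++ [m]) ++ rest ++ [lastv] = front ++ (m :: rest) ++ [lastv] := by simp
        rw [heq] at this
        exact this

-- ===== VERDICT (by name: the statement is the Claim_ definition above) =====
theorem new_leg_val_py_spec : Claim_equal_new_leg_val_py := by
  intro leg_value legs _ hpre
  unfold Spec_new_leg_val_py
  unfold Pre_new_leg_val_py at hpre
  cases legs with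
  | nil => cases leg_value <;> simp [new_leg_val_py, new_leg_val_py_alt]
  | cons h t =>
    cases leg_value with
    | none => simp [new_leg_val_py, new_leg_val_py_alt]
    | some v =>
      have hpre : (h :: t).Pairwise (· ≤ ·) := by
        rcases hpre with hs | hn
        · exact hs
        · exact absurd hn (by simp)
      rw [alt_eq_canon v (h :: t) hpre]
      by_cases hvh : v < h
      · have hnm : v ∉ h :: t := by
          intro hv
          obtain ⟨j, hj, hjv⟩ := List.mem_iff_getElem.mp hv
          have h0 : (h :: t)[0] ≤ (h :: t)[j] := sorted_index_le hpre (by simp) hj (by omega)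
          simp at h0
          omega
        have hcnt : (h :: t).countP (· < v) = 0 := by
          apply List.countP_eq_zero.mpr
          intro x hx
          obtain ⟨j, hj, rfl⟩ := List.mem_iff_getElem.mp hx
          have h0 : (h :: t)[0] ≤ (h :: t)[j] := sorted_index_le hpre (by simp) hj (by omega)
          simp at h0 ⊢
          omega
        simp [new_leg_val_py, PySem.List.pyGet?_zero_cons, hvh, canonV, hnm, hcnt]
      · have hne : (h :: t) ≠ [] := by simp
        have hdecomp : (h :: t).dropLast ++ [(h :: t).getLast hne] = h :: t :=
          List.dropLast_append_getLast hne
        have key := loop_eq_canon v ((h :: t).getLast hne) (h :: t).dropLast [] (by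
            rw [List.nil_append, hdecomp]; exact hpre)
          (by simp)
          (by intro m hm; rw [hdecomp] at hm; simp at hm; omega)
        rw [List.nil_append, hdecomp] at key
        simp only [new_leg_val_py, List.length_cons, PySem.List.pyGet?_zero_cons,
          PySem.List.slice_to_neg_one, PySem.List.pyGet?_neg_one,
          List.getLast?_eq_getLast hne, Option.getD_some]
        rw [if_neg (by omega : ¬ t.length + 1 = 0), if_neg hvh]
        simp only [List.length_nil, Nat.cast_zero, List.length_cons] at key
        exact key
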